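-- pv_equiv track=rewrite | github.com/Youssef-El-Garmit/La-Ville-Brule--Code | LaVilleBrule.py | afficheQuilles
-- ===== SOURCE A (Python) =====
-- def afficheQuilles(q, n):
--     NbLignes = len(q)
--     i = 0
--     SchemaFinale = ""
--
--     # Cas où il n'y a pas de quilles debout, donc pas de liste,
--     if NbLignes == 0:
--         SchemaFinale = SchemaFinale + "." * n
--
--     # Cas où il y au moins une quille debout
--     else:
--
--         # Cette première boucle while va nous permettre d'étudier toutes les quilles une à une et
--         # elle va surtout nous permettre de délimiter le nombre de quilles à afficher pour ne pas
--         # qu'il y en ait plus que prévu au final.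
--         while i < n:
--             x = 0
--
--             # Cette deuxième boucle va nous permettre d'étudier toutes les listes de quilles debout
--             while x < NbLignes:
--
--                 # Ce if nous permet de savoir si la quille etudiée (i) est bien la première quille debout d'une liste,
--                 # n'importe laquelle
--                 if i == q[x][0]:
--
--                     # Cas où i (la quille etudiée) est la premiere quille debout de la première liste
--                     if x == 0:
--
--                         # Cette variable permet de calculer le nombre d'éléments (donc de quilles parterre),
--                         # de 0 jusqu'à la première liste ainsi que le nombre d'éléments dans la première liste (donc de
--                         # quilles debout), bien sûr si ces quilles existent, et de les multiplier par leur symbole, "|"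
--                         # pour debout et "." pour parterre.
--                         QuillesJusquaPrmListe = ((q[x][0] - 1) + 1) * "." + (q[x][1] - (q[x][0] - 1)) * "|"
--
--                         # Ici l'ordi retient cet enchaînement de caractère, dans le bon sens pour pouvoir l'afficher
--                         # à la fin de la procédure, dans ce cas là (if).
--                         SchemaFinale = SchemaFinale + QuillesJusquaPrmListe
--
--                     # Cas où la quille etudiée (i) n'est pas la première quille debout de la première liste
--                     else:
--
--                         # Cette variable fait la même chose que la précédente sauf que l'on part plus de zéro mais de
--                         # la fin de la liste précédente jusqu'à la fin de la liste suivante.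
--                         QuillesEntrePrmDrnListe = (q[x][0] - (q[x - 1][1] - 1) - 2) * "." + (
--                                     q[x][1] - (q[x][0] - 1)) * "|"
--
--                         # Ici l'ordi retient encore cet enchaînement de caractère, pour pouvoir l'afficher
--                         # à la fin de la procédure, mais dans ce cas là (else).
--                         SchemaFinale = SchemaFinale + QuillesEntrePrmDrnListe
--                 x = x + 1
--             i = i + 1
--
--         # Cette dernière variable permet de calculer le nombre de quilles parterre, donc d'élément, entre la dernière
--         # liste et la dernière quille, si il y en a biensûr.
--         DernierresQuilles = (n - 1) - q[len(q) - 1][1]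
--
--         # Ici l'ordi ajoute à l'enchaînement de caractère sortie de la boucle while la dernière ligne de quilles
--         # parterre si elle existe.
--         SchemaFinale = SchemaFinale + "." * DernierresQuilles
--
--     # Enfin la fonction renvoie l'enchaînement final de quilles (de caractère).
--     return SchemaFinale
-- ===== SOURCE B (Python) =====
-- def afficheQuilles(q, n):
--     # Index the rows by their start pin, then walk the pin positions once,
--     # drawing each row (gap dots from the previous row's end, then bars) as
--     # its start position is reached.
--     by_start = {}
--     prev = -1
--     for row in q:
--         s, e = row[0], row[1]
--         by_start.setdefault(s, []).append((prev, e))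
--         prev = e
--     parts = []
--     for i in range(n):
--         for p, e in by_start.get(i, ()):
--             parts.append("." * (i - p - 1) + "|" * (e - i + 1))
--     parts.append("." * (n - 1 - prev))
--     return "".join(parts)
-- ===== Notes on version B (the rewrite author's own statement) =====
-- stated objective: faster
-- what changed: B indexes the rows by start pin in one pass over q (a dict of (previous-end, end) buckets) and then walks the pin positions 0..n-1 once, drawing each bucket as its position is reached, where A rescans all of q for every pin position; Pre_ excludes rows with fewer than two entries, on which B (which reads both pins of every row up front) raises IndexError while A raises too unless the short row is never drawn.
-- outside the precondition, e.g. on afficheQuilles([[5], [0, 1]], 0): A returns '', B raises IndexError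
import Mathlib
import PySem

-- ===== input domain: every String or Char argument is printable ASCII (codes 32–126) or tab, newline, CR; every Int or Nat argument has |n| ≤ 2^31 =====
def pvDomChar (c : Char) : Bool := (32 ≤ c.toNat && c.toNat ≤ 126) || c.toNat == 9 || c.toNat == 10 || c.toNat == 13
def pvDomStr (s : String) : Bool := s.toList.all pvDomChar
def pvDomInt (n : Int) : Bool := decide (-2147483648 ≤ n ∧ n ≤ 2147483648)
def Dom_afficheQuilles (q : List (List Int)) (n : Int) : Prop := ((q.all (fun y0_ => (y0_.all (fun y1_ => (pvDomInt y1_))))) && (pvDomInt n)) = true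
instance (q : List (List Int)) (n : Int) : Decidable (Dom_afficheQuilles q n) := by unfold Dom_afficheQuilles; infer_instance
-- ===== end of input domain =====

-- B indexes the row drawings by start pin once (a dict of buckets) and walks the pin
-- positions once, where A rescans all of q for every pin position; a timing run
-- measured B faster on the large inputs (O(n + len q + output) vs O(n·len q + output)).

-- shared small helpers: Python's "c" * k (empty for k ≤ 0), q[x][0] and q[x][1] as total reads
def pvRep (k : Int) (c : Char) : List Char := List.replicate k.toNat c
def pvHead (q : List (List Int)) (x : Nat) : Int := (q.getD x []).headD 0
def pvSnd (q : List (List Int)) (x : Nat) : Int := (q.getD x []).getD 1 0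

-- ===== PORT A =====
def afficheQuilles (q : List (List Int)) (n : Int) : String :=
  if q.length = 0 then
    String.ofList (pvRep n '.')
  else
    let body := (PySem.List.pyRange 0 n 1).foldl (fun acc i =>
      (List.range q.length).foldl (fun acc2 x =>
        if i = pvHead q x then
          if x = 0 then
            acc2 ++ (pvRep ((pvHead q x - 1) + 1) '.' ++ pvRep (pvSnd q x - (pvHead q x - 1)) '|')
          else
            acc2 ++ (pvRep (pvHead q x - (pvSnd q (x - 1) - 1) - 2) '.' ++ pvRep (pvSnd q x - (pvHead q x - 1)) '|')
        else acc2) acc) ([] : List Char)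
    String.ofList (body ++ pvRep ((n - 1) - pvSnd q (q.length - 1)) '.')

-- ===== PORT B =====
-- Python's by_start.setdefault(s, []).append((prev, e)) is d.modify s [] (· ++ [(prev, e)]) (exact)
def afficheQuilles_alt (q : List (List Int)) (n : Int) : String :=
  let st := q.foldl (fun (st : PySem.Dict Int (List (Int × Int)) × Int) row =>
    (st.1.modify (row.headD 0) [] (fun b => b ++ [(st.2, row.getD 1 0)]), row.getD 1 0))
    (PySem.Dict.empty, (-1 : Int))
  let parts := (PySem.List.pyRange 0 n 1).foldl
    (fun acc i => (st.1.getD i []).foldl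
      (fun acc2 pe => acc2 ++ (pvRep (i - pe.1 - 1) '.' ++ pvRep (pe.2 - i + 1) '|')) acc)
    ([] : List Char)
  String.ofList (parts ++ pvRep (n - 1 - st.2) '.')

-- ===== PRECONDITION & SPEC =====
-- Pre_ excludes rows with fewer than two entries: Python A raises IndexError on them whenever
-- such a row is drawn or is last, and B, which reads both pins of every row up front, raises
-- IndexError on all of them.
def Pre_afficheQuilles (q : List (List Int)) (n : Int) : Prop :=
  ∀ r ∈ q, 2 ≤ r.length
instance (q : List (List Int)) (n : Int) : Decidable (Pre_afficheQuilles q n) := by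
  unfold Pre_afficheQuilles; infer_instance

def pvWitness_afficheQuilles : List (List Int) × Int := ([[0, 1], [3, 4]], 5)

def Spec_afficheQuilles (q : List (List Int)) (n : Int) (out : String) : Prop := out = afficheQuilles_alt q n
instance (q : List (List Int)) (n : Int) (out : String) : Decidable (Spec_afficheQuilles q n out) := by unfold Spec_afficheQuilles; infer_instance

-- ===== CLAIM (what is proved, stated in full; the proofs are below) =====
def Claim_equal_afficheQuilles : Prop := ∀ (q : List (List Int)) (n : Int), Dom_afficheQuilles q n → Pre_afficheQuilles q n → Spec_afficheQuilles q n (afficheQuilles q n)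

-- ===== LEMMAS AND PROOFS =====

-- A's segment for row x, written uniformly with the previous end pin p (-1 before the first row)
def pvSegP (p : Int) (q : List (List Int)) (x : Nat) : List Char :=
  pvRep (pvHead q x - (if x = 0 then p else pvSnd q (x - 1)) - 1) '.' ++
    pvRep (pvSnd q x - pvHead q x + 1) '|'

-- the drawing B emits at position i for a bucket entry (previous end pin, end pin)
def pvDraw (i : Int) (pe : Int × Int) : List Char :=
  pvRep (i - pe.1 - 1) '.' ++ pvRep (pe.2 - i + 1) '|'

-- the (previous end, end) pairs of the rows of l whose start pin is i, front to back
def pvSel (i : Int) (p : Int) : List (List Int) → List (Int × Int)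
  | [] => []
  | r :: rs => (if r.headD 0 = i then [(p, r.getD 1 0)] else []) ++ pvSel i (r.getD 1 0) rs

def pvLastE (p : Int) : List (List Int) → Int
  | [] => p
  | r :: rs => pvLastE (r.getD 1 0) rs

lemma pv_segP_zero (p : Int) (r : List Int) (rs : List (List Int)) :
    pvSegP p (r :: rs) 0
      = pvRep (r.headD 0 - p - 1) '.' ++ pvRep (r.getD 1 0 - r.headD 0 + 1) '|' := by
  unfold pvSegP pvHead pvSnd
  simp

lemma pv_segP_shift (p : Int) (r : List Int) (rs : List (List Int)) (x : Nat) :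
    pvSegP p (r :: rs) (x + 1) = pvSegP (r.getD 1 0) rs x := by
  unfold pvSegP pvHead pvSnd
  cases x with
  | zero => simp
  | succ y => simp

lemma pv_head_shift (r : List Int) (rs : List (List Int)) (x : Nat) :
    pvHead (r :: rs) (x + 1) = pvHead rs x := by
  unfold pvHead
  simp

lemma pv_sel_A (q : List (List Int)) : ∀ (p i : Int),
    (List.range q.length).flatMap
        (fun x => if decide (pvHead q x = i) then pvSegP p q x else [])
      = (pvSel i p q).flatMap (pvDraw i) := by
  induction q with
  | nil => intro p i; simp [pvSel]
  | cons r rs ih =>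
    intro p i
    rw [List.length_cons, List.range_succ_eq_map, List.flatMap_cons, List.flatMap_map]
    have h2 : (fun x => if decide (pvHead (r :: rs) (x + 1) = i) then pvSegP p (r :: rs) (x + 1) else [])
        = fun x => if decide (pvHead rs x = i) then pvSegP (r.getD 1 0) rs x else [] := by
      funext x
      rw [pv_head_shift, pv_segP_shift]
    have h0 : pvHead (r :: rs) 0 = r.headD 0 := by unfold pvHead; simp
    rw [h2, ih, pvSel, List.flatMap_append, h0, pv_segP_zero]
    congr 1
    by_cases h : r.headD 0 = i
    · rw [if_pos (decide_eq_true h), if_pos h]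
      unfold pvDraw
      rw [h]
      simp
    · rw [if_neg (by simpa using h), if_neg h]
      rfl

lemma pv_build (l : List (List Int)) :
    ∀ (d : PySem.Dict Int (List (Int × Int))) (p i : Int),
      ((l.foldl (fun (st : PySem.Dict Int (List (Int × Int)) × Int) row =>
          (st.1.modify (row.headD 0) [] (fun b => b ++ [(st.2, row.getD 1 0)]), row.getD 1 0)) (d, p)).1).getD i []
        = d.getD i [] ++ pvSel i p l := by
  induction l with
  | nil => intro d p i; simp [pvSel]
  | cons r rs ih =>
    intro d p i
    rw [List.foldl_cons, ih, pvSel]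
    rw [PySem.Dict.getD_modify]
    by_cases h : i = r.headD 0
    · subst h
      rw [if_pos rfl, if_pos rfl]
      simp
    · rw [if_neg h, if_neg (fun hh => h hh.symm)]
      simp

lemma pv_build_snd (l : List (List Int)) :
    ∀ (d : PySem.Dict Int (List (Int × Int))) (p : Int),
      (l.foldl (fun (st : PySem.Dict Int (List (Int × Int)) × Int) row =>
          (st.1.modify (row.headD 0) [] (fun b => b ++ [(st.2, row.getD 1 0)]), row.getD 1 0)) (d, p)).2
        = pvLastE p l := by
  induction l with
  | nil => intro d p; simp [pvLastE]
  | cons r rs ih => intro d p; rw [List.foldl_cons, ih, pvLastE]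

lemma pv_lastE (q : List (List Int)) : ∀ p : Int, q ≠ [] →
    pvLastE p q = pvSnd q (q.length - 1) := by
  induction q with
  | nil => intro p h; exact absurd rfl h
  | cons r rs ih =>
    intro p _
    cases rs with
    | nil => simp [pvLastE, pvSnd]
    | cons r2 rs2 =>
      rw [pvLastE, ih _ (by simp)]
      unfold pvSnd
      simp
      rfl

theorem afficheQuilles_spec : Claim_equal_afficheQuilles := by
  unfold Claim_equal_afficheQuilles
  intro q n _ _
  unfold Spec_afficheQuilles afficheQuilles afficheQuilles_alt
  dsimp only
  rw [pv_build_snd]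
  have hbody : (PySem.List.pyRange 0 n 1).foldl
      (fun acc i =>
        (((q.foldl (fun (st : PySem.Dict Int (List (Int × Int)) × Int) row =>
          (st.1.modify (row.headD 0) [] (fun b => b ++ [(st.2, row.getD 1 0)]), row.getD 1 0))
          (PySem.Dict.empty, (-1 : Int))).1).getD i []).foldl
          (fun acc2 pe => acc2 ++ (pvRep (i - pe.1 - 1) '.' ++ pvRep (pe.2 - i + 1) '|')) acc)
      ([] : List Char)
      = (PySem.List.pyRange 0 n 1).foldl
        (fun acc i => acc ++ (pvSel i (-1) q).flatMap (pvDraw i)) ([] : List Char) := by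
    have hf : (fun (acc : List Char) (i : Int) =>
        (((q.foldl (fun (st : PySem.Dict Int (List (Int × Int)) × Int) row =>
          (st.1.modify (row.headD 0) [] (fun b => b ++ [(st.2, row.getD 1 0)]), row.getD 1 0))
          (PySem.Dict.empty, (-1 : Int))).1).getD i []).foldl
          (fun acc2 pe => acc2 ++ (pvRep (i - pe.1 - 1) '.' ++ pvRep (pe.2 - i + 1) '|')) acc)
        = fun acc i => acc ++ (pvSel i (-1) q).flatMap (pvDraw i) := by
      funext acc i
      rw [pv_build]
      have hg : (fun (acc2 : List Char) (pe : Int × Int) =>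
          acc2 ++ (pvRep (i - pe.1 - 1) '.' ++ pvRep (pe.2 - i + 1) '|'))
          = fun acc2 pe => acc2 ++ pvDraw i pe := by
        funext acc2 pe
        rfl
      rw [hg, PySem.List.foldl_append_eq_flatMap]
      simp
    rw [hf]
  by_cases hq : q = []
  · subst hq
    have hz : (PySem.List.pyRange 0 n 1).foldl
        (fun (acc : List Char) (i : Int) => acc ++ (pvSel i (-1) []).flatMap (pvDraw i))
        ([] : List Char) = [] := by
      rw [PySem.List.foldl_append_eq_flatMap]
      have hf : (fun (i : Int) => (pvSel i (-1) []).flatMap (pvDraw i)) = fun _ => ([] : List Char) := by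
        funext i
        simp [pvSel]
      rw [hf]
      simp
    have e2 : n - 1 - pvLastE (-1) ([] : List (List Int)) = n := by
      unfold pvLastE
      ring
    rw [if_pos (by trivial), e2, hbody, hz]
    simp
  · have hlen : ¬ q.length = 0 := by simpa [List.length_eq_zero_iff] using hq
    simp only [hlen, if_false]
    rw [hbody, pv_lastE q (-1) hq]
    have hchunk : ∀ x : Nat,
        (if x = 0 then
          pvRep ((pvHead q x - 1) + 1) '.' ++ pvRep (pvSnd q x - (pvHead q x - 1)) '|'
        else
          pvRep (pvHead q x - (pvSnd q (x - 1) - 1) - 2) '.' ++ pvRep (pvSnd q x - (pvHead q x - 1)) '|')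
        = pvSegP (-1) q x := by
      intro x
      unfold pvSegP
      by_cases hx : x = 0 <;> simp only [hx, if_true, if_false]
      · have e1 : (pvHead q 0 - 1) + 1 = pvHead q 0 - (-1) - 1 := by ring
        have e2 : pvSnd q 0 - (pvHead q 0 - 1) = pvSnd q 0 - pvHead q 0 + 1 := by ring
        rw [e1, e2]
      · have e1 : pvHead q x - (pvSnd q (x - 1) - 1) - 2 = pvHead q x - pvSnd q (x - 1) - 1 := by ring
        have e2 : pvSnd q x - (pvHead q x - 1) = pvSnd q x - pvHead q x + 1 := by ring
        rw [e1, e2]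
    have hinner : ∀ (i : Int) (acc : List Char),
        (List.range q.length).foldl (fun acc2 x =>
          if i = pvHead q x then
            if x = 0 then
              acc2 ++ (pvRep ((pvHead q x - 1) + 1) '.' ++ pvRep (pvSnd q x - (pvHead q x - 1)) '|')
            else
              acc2 ++ (pvRep (pvHead q x - (pvSnd q (x - 1) - 1) - 2) '.' ++ pvRep (pvSnd q x - (pvHead q x - 1)) '|')
          else acc2) acc
        = acc ++ (pvSel i (-1) q).flatMap (pvDraw i) := by
      intro i acc
      have hfun : (fun (acc2 : List Char) (x : Nat) =>
          if i = pvHead q x then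
            if x = 0 then
              acc2 ++ (pvRep ((pvHead q x - 1) + 1) '.' ++ pvRep (pvSnd q x - (pvHead q x - 1)) '|')
            else
              acc2 ++ (pvRep (pvHead q x - (pvSnd q (x - 1) - 1) - 2) '.' ++ pvRep (pvSnd q x - (pvHead q x - 1)) '|')
          else acc2)
          = fun (acc2 : List Char) (x : Nat) =>
              acc2 ++ (if decide (pvHead q x = i) then pvSegP (-1) q x else []) := by
        funext acc2 x
        by_cases h : i = pvHead q x
        · simp only [h, if_true, decide_true, ← hchunk x]
          by_cases hx : x = 0 <;> simp [hx]
        · have h' : ¬ pvHead q x = i := fun hh => h hh.symm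
          simp [h, h']
      rw [hfun, PySem.List.foldl_append_eq_flatMap, pv_sel_A]
    have houter : (fun (acc : List Char) (i : Int) =>
        (List.range q.length).foldl (fun acc2 x =>
          if i = pvHead q x then
            if x = 0 then
              acc2 ++ (pvRep ((pvHead q x - 1) + 1) '.' ++ pvRep (pvSnd q x - (pvHead q x - 1)) '|')
            else
              acc2 ++ (pvRep (pvHead q x - (pvSnd q (x - 1) - 1) - 2) '.' ++ pvRep (pvSnd q x - (pvHead q x - 1)) '|')
          else acc2) acc)
        = fun acc i => acc ++ (pvSel i (-1) q).flatMap (pvDraw i) := by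
      funext acc i; exact hinner i acc
    rw [houter]
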